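-- pv_equiv track=rewrite | github.com/Robert2003/Antivirus | my_av.py | special_character_domain
-- ===== SOURCE A (Python) =====
-- def special_character_domain(domain):
--     special_characters = [".", "-"]
--     count = 0
--     for i in range(len(special_characters)):
--         count = 0
--         for j in range(len(domain)):
--             if domain[j] in special_characters[i]:
--                 count += 1
--         if count >= 4 and i == 0:
--             return 1
--         if count >= 3 and i == 1:
--             return 1
--     return 0
-- ===== SOURCE B (Python) =====
-- def special_character_domain(domain):
--     dots = 0
--     dashes = 0
--     for ch in domain:
--         if ch == '.':
--             dots += 1
--         elif ch == '-':
--             dashes += 1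
--     return 1 if dots >= 4 or dashes >= 3 else 0
-- ===== Notes on version B (the rewrite author's own statement) =====
-- stated objective: faster
-- what changed: Replaces A's two full scans (an outer loop over the special-character list with a membership test inside) with a single pass over the string maintaining both counters, deciding 1/0 once at the end.
import Mathlib
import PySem

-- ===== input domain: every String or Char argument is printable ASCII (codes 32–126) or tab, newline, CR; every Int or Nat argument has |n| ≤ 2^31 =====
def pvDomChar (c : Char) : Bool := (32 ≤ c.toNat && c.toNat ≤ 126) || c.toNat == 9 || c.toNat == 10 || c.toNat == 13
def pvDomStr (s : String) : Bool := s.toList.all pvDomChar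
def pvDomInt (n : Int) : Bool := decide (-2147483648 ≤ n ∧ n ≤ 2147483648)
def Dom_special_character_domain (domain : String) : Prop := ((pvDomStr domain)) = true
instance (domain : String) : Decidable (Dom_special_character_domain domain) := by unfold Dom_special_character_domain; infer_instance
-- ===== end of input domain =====

-- B replaces A's two full scans (one per special character) with a single pass keeping both counters; objective: simpler.

-- ===== PORT A =====
-- A scans the whole string once per special character ('.' then '-'),
-- returning 1 early if the respective threshold (4 for '.', 3 for '-') is met.
def special_character_domain (domain : String) : Int :=
  let count0 : Int := domain.toList.foldl (fun c ch => if ch = '.' then c + 1 else c) 0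
  if count0 ≥ 4 then 1
  else
    let count1 : Int := domain.toList.foldl (fun c ch => if ch = '-' then c + 1 else c) 0
    if count1 ≥ 3 then 1 else 0

-- ===== PORT B =====
-- single pass maintaining (dots, dashes)
def special_character_domain_alt (domain : String) : Int :=
  let p : Int × Int := domain.toList.foldl
    (fun p ch => if ch = '.' then (p.1 + 1, p.2) else if ch = '-' then (p.1, p.2 + 1) else p)
    (0, 0)
  if p.1 ≥ 4 ∨ p.2 ≥ 3 then 1 else 0

-- ===== PRECONDITION & SPEC =====
def Spec_special_character_domain (domain : String) (out : Int) : Prop := out = special_character_domain_alt domain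
instance (domain : String) (out : Int) : Decidable (Spec_special_character_domain domain out) := by unfold Spec_special_character_domain; infer_instance

-- ===== CLAIM (what is proved, stated in full; the proofs are below) =====
def Claim_equal_special_character_domain : Prop := ∀ (domain : String), Dom_special_character_domain domain → Spec_special_character_domain domain (special_character_domain domain)

-- ===== LEMMAS AND PROOFS =====
theorem pv_pairfold (l : List Char) (a b : Int) :
    l.foldl (fun p ch => if ch = '.' then (p.1 + 1, p.2) else if ch = '-' then (p.1, p.2 + 1) else p) (a, b)
      = (l.foldl (fun c ch => if ch = '.' then c + 1 else c) a,
         l.foldl (fun c ch => if ch = '-' then c + 1 else c) b) := by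
  induction l generalizing a b with
  | nil => rfl
  | cons x xs ih =>
    simp only [List.foldl_cons]
    by_cases hx : x = '.'
    · simp [hx, ih]
    · by_cases hy : x = '-'
      · simp [hx, hy, ih]
      · simp [hx, hy, ih]

-- ===== VERDICT (by name: the statement is the Claim_ definition above) =====
theorem special_character_domain_spec : Claim_equal_special_character_domain := by
  intro domain _
  unfold Spec_special_character_domain special_character_domain special_character_domain_alt
  rw [pv_pairfold]
  simp only []
  split_ifs with h1 h2 h3 <;> first | rfl | (exfalso; omega)
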